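-- pv_equiv track=rewrite | github.com/enniorampello/ANN | Lab2/4.3/main_ennio.py | get_neighbors_idxs
-- ===== SOURCE A (Python) =====
-- def get_neighbors_idxs(winner_idx, neigh_size, num_nodes_x, num_nodes_y):
--     x = winner_idx[0]
--     y = winner_idx[1]
--     idxs = []
--     for i in range(num_nodes_x):
--         for j in range(num_nodes_y):
--             if abs(i - x) <= round(neigh_size) and abs(j - y) <= round(neigh_size):
--                 idxs.append((i, j))
--     return idxs
-- ===== SOURCE B (Python) =====
-- def get_neighbors_idxs(winner_idx, neigh_size, num_nodes_x, num_nodes_y):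
--     x = winner_idx[0]
--     y = winner_idx[1]
--     r = round(neigh_size)
--     x_lo, x_hi = max(0, x - r), min(num_nodes_x - 1, x + r)
--     y_lo, y_hi = max(0, y - r), min(num_nodes_y - 1, y + r)
--     return [(i, j)
--             for i in range(x_lo, x_hi + 1)
--             for j in range(y_lo, y_hi + 1)]
-- ===== Notes on version B (the rewrite author's own statement) =====
-- stated objective: faster
-- what changed: Instead of scanning the entire num_nodes_x*num_nodes_y grid and testing each cell against the neighborhood radius, B iterates directly over the radius box clamped to the grid, emitting cells in the same row-major order with no membership test.
import Mathlib
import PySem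

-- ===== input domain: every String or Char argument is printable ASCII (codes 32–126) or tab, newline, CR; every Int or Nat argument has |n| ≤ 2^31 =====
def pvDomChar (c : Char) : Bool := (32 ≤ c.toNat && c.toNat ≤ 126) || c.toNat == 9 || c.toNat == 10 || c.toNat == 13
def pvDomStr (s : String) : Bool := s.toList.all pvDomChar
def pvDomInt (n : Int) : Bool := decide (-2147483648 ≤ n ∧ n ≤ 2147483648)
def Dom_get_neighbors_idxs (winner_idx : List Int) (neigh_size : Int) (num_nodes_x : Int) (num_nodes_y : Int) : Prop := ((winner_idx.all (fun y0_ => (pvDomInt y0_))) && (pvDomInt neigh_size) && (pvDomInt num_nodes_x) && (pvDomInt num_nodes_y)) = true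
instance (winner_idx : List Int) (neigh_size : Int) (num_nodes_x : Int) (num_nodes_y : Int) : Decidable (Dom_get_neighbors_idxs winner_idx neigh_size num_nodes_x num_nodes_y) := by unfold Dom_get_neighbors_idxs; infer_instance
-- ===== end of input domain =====

-- B replaces A's full-grid scan with a direct walk of the radius box clamped to the
-- grid (same cells, same row-major order), so cost is the box size, not the grid size.
-- round(neigh_size) is the identity here since neigh_size is an int.

-- ===== PORT A =====
def get_neighbors_idxs (winner_idx : List Int) (neigh_size : Int) (num_nodes_x : Int) (num_nodes_y : Int) : List (List Int) :=
  let x := (PySem.List.pyGet? winner_idx 0).getD 0   -- Pre_ guarantees the index is in range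
  let y := (PySem.List.pyGet? winner_idx 1).getD 0
  (PySem.List.pyRange 0 num_nodes_x 1).foldl (fun idxs i =>
    (PySem.List.pyRange 0 num_nodes_y 1).foldl (fun idxs j =>
      if |i - x| ≤ neigh_size ∧ |j - y| ≤ neigh_size then idxs ++ [[i, j]] else idxs) idxs) []

-- ===== PORT B =====
def get_neighbors_idxs_alt (winner_idx : List Int) (neigh_size : Int) (num_nodes_x : Int) (num_nodes_y : Int) : List (List Int) :=
  let x := (PySem.List.pyGet? winner_idx 0).getD 0
  let y := (PySem.List.pyGet? winner_idx 1).getD 0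
  let xlo := max 0 (x - neigh_size)
  let xhi := min (num_nodes_x - 1) (x + neigh_size)
  let ylo := max 0 (y - neigh_size)
  let yhi := min (num_nodes_y - 1) (y + neigh_size)
  (PySem.List.pyRange xlo (xhi + 1) 1).flatMap (fun i =>
    (PySem.List.pyRange ylo (yhi + 1) 1).map (fun j => [i, j]))

-- ===== PRECONDITION & SPEC =====
-- Pre_: winner_idx needs at least two entries, otherwise A raises IndexError on winner_idx[0]/[1].
def Pre_get_neighbors_idxs (winner_idx : List Int) (neigh_size : Int) (num_nodes_x : Int) (num_nodes_y : Int) : Prop :=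
  2 ≤ winner_idx.length
instance (winner_idx : List Int) (neigh_size : Int) (num_nodes_x : Int) (num_nodes_y : Int) : Decidable (Pre_get_neighbors_idxs winner_idx neigh_size num_nodes_x num_nodes_y) := by unfold Pre_get_neighbors_idxs; infer_instance

def pvWitness_get_neighbors_idxs : List Int × Int × Int × Int := ([1, 2], 1, 4, 4)

def Spec_get_neighbors_idxs (winner_idx : List Int) (neigh_size : Int) (num_nodes_x : Int) (num_nodes_y : Int) (out : List (List Int)) : Prop := out = get_neighbors_idxs_alt winner_idx neigh_size num_nodes_x num_nodes_y
instance (winner_idx : List Int) (neigh_size : Int) (num_nodes_x : Int) (num_nodes_y : Int) (out : List (List Int)) : Decidable (Spec_get_neighbors_idxs winner_idx neigh_size num_nodes_x num_nodes_y out) := by unfold Spec_get_neighbors_idxs; infer_instance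

-- ===== CLAIM (what is proved, stated in full; the proofs are below) =====
def Claim_equal_get_neighbors_idxs : Prop := ∀ (winner_idx : List Int) (neigh_size : Int) (num_nodes_x : Int) (num_nodes_y : Int), Dom_get_neighbors_idxs winner_idx neigh_size num_nodes_x num_nodes_y → Pre_get_neighbors_idxs winner_idx neigh_size num_nodes_x num_nodes_y → Spec_get_neighbors_idxs winner_idx neigh_size num_nodes_x num_nodes_y (get_neighbors_idxs winner_idx neigh_size num_nodes_x num_nodes_y)

-- ===== LEMMAS AND PROOFS =====

-- Filtering an interval condition out of a unit-step range yields the clamped subrange.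
theorem pv_filter_pyRange_interval (lo hi : Int) : ∀ (n : Nat) (a b : Int), (b - a).toNat = n →
    (PySem.List.pyRange a b 1).filter (fun k => decide (lo ≤ k ∧ k ≤ hi))
      = PySem.List.pyRange (max a lo) (min b (hi + 1)) 1 := by
  intro n
  induction n with
  | zero =>
      intro a b h
      have hba : b ≤ a := by omega
      rw [PySem.List.pyRange_one_eq_nil hba, PySem.List.pyRange_one_eq_nil (by omega)]
      rfl
  | succ m ih =>
      intro a b h
      have hab : a < b := by omega
      rw [PySem.List.pyRange_one_cons hab, List.filter_cons]
      by_cases hP : lo ≤ a ∧ a ≤ hi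
      · have : (decide (lo ≤ a ∧ a ≤ hi)) = true := by simp [hP]
        rw [this, if_pos rfl, ih (a + 1) b (by omega)]
        have h1 : max a lo = a := by omega
        have h2 : max (a + 1) lo = a + 1 := by omega
        rw [h1, h2, show PySem.List.pyRange a (min b (hi + 1)) 1
              = a :: PySem.List.pyRange (a + 1) (min b (hi + 1)) 1 from
            PySem.List.pyRange_one_cons (by omega)]
      · have : (decide (lo ≤ a ∧ a ≤ hi)) = false := by simp [hP]
        rw [this, if_neg (by simp), ih (a + 1) b (by omega)]
        by_cases hlo : lo ≤ a
        · -- then a > hi: both sides are empty ranges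
          have hhi : hi < a := by omega
          rw [show PySem.List.pyRange (max (a + 1) lo) (min b (hi + 1)) 1 = [] from
                PySem.List.pyRange_one_eq_nil (by omega),
              show PySem.List.pyRange (max a lo) (min b (hi + 1)) 1 = [] from
                PySem.List.pyRange_one_eq_nil (by omega)]
        · have h1 : max a lo = lo := by omega
          have h2 : max (a + 1) lo = lo := by omega
          rw [h1, h2]

theorem pv_flatMap_if (l : List Int) (p : Int → Bool) (h : Int → List (List Int)) :
    l.flatMap (fun i => if p i then h i else []) = (l.filter p).flatMap h := by
  induction l with
  | nil => rfl
  | cons a t ih =>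
      rw [List.flatMap_cons, List.filter_cons]
      by_cases hp : p a = true
      · rw [hp, if_pos rfl, if_pos rfl, List.flatMap_cons, ih]
      · rw [Bool.not_eq_true] at hp
        rw [hp, if_neg (by simp), if_neg (by simp), ih, List.nil_append]

-- ===== VERDICT (by name: the statement is the Claim_ definition above) =====
theorem get_neighbors_idxs_spec : Claim_equal_get_neighbors_idxs := by
  intro w r nx ny _ _
  unfold Spec_get_neighbors_idxs get_neighbors_idxs get_neighbors_idxs_alt
  set x := (PySem.List.pyGet? w 0).getD 0 with hx
  set y := (PySem.List.pyGet? w 1).getD 0 with hy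
  -- turn A's nested appending folds into flatMap/filter form
  simp only [PySem.List.foldl_append_ite, PySem.List.foldl_append_eq_flatMap, List.nil_append]
  -- split the conjunctive test: per-row guard and column filter
  have hsplit : ∀ i : Int,
      ((PySem.List.pyRange 0 ny 1).filter (fun j => decide (|i - x| ≤ r ∧ |j - y| ≤ r))).map (fun j => [i, j])
        = if decide (|i - x| ≤ r) then
            ((PySem.List.pyRange 0 ny 1).filter (fun j => decide (y - r ≤ j ∧ j ≤ y + r))).map (fun j => [i, j])
          else [] := by
    intro i
    by_cases hi : |i - x| ≤ r
    · rw [if_pos (by simpa using hi)]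
      congr 1
      apply List.filter_congr
      intro j _
      simp only [decide_eq_decide]
      constructor
      · rintro ⟨-, hj⟩; have := abs_le.mp hj; omega
      · intro hj; exact ⟨hi, abs_le.mpr (by omega)⟩
    · rw [if_neg (by simpa using hi)]
      have : (PySem.List.pyRange 0 ny 1).filter (fun j => decide (|i - x| ≤ r ∧ |j - y| ≤ r)) = [] := by
        apply List.filter_eq_nil_iff.mpr
        intro j _
        simp [hi]
      rw [this]; rfl
  simp only [hsplit]
  rw [pv_flatMap_if]
  have hxf : (PySem.List.pyRange 0 nx 1).filter (fun i => decide (|i - x| ≤ r))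
      = PySem.List.pyRange (max 0 (x - r)) (min nx (x + r + 1)) 1 := by
    have := pv_filter_pyRange_interval (x - r) (x + r) (nx - 0).toNat 0 nx rfl
    rw [← this]
    apply List.filter_congr
    intro i _
    simp only [decide_eq_decide]
    constructor
    · intro hi; have := abs_le.mp hi; omega
    · intro hi; exact abs_le.mpr (by omega)
  have hyf : (PySem.List.pyRange 0 ny 1).filter (fun j => decide (y - r ≤ j ∧ j ≤ y + r))
      = PySem.List.pyRange (max 0 (y - r)) (min ny (y + r + 1)) 1 :=
    pv_filter_pyRange_interval (y - r) (y + r) (ny - 0).toNat 0 ny rfl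
  simp only [hxf, hyf]
  have e1 : min nx (x + r + 1) = min (nx - 1) (x + r) + 1 := by omega
  have e2 : min ny (y + r + 1) = min (ny - 1) (y + r) + 1 := by omega
  rw [e1, e2]
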